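-- pv_equiv track=rewrite | github.com/ponjae/FPL-project | playerData.py | _calculate_player_fdr
-- ===== SOURCE A (Python) =====
-- def _calculate_player_fdr(team, remaining_gws, next_gw_number):
--     """ Function for calculating the fdr rating for a specific player beloning to a specific team
--
--     Args:
--         team (int): the id of the team that the player belongs to
--         remaining_gws ([dict]): the fdr dict
--         next_gw_number ([int]): the upcomming gw_number (where to start looking)
--
--     Returns:
--         (Union(int, None), Union(int, None), Union(int, None)): A tuple containing the fdr-sum for the next, next-five
--         total remaining games if present, else None
--     """
--
--     next_gw_fdr = None
--     next_five_fdr = None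
--     remaining_fdr = None
--     games_remaining = len(remaining_gws)
--     if games_remaining >= 1:
--         next_gw = remaining_gws[next_gw_number]
--         if team in next_gw.keys():
--             next_gw_fdr = sum(next_gw[team])
--
--     if games_remaining > 4:
--         next_five_fdr = sum([sum(remaining_gws[gw][team]) for gw in range(
--             next_gw_number, next_gw_number + 5) if team in remaining_gws[gw].keys()])
--
--     remaining_fdr = sum([sum(remaining_gws[gw][team]) for gw in range(
--         next_gw_number, next_gw_number + len(remaining_gws)) if team in remaining_gws[gw].keys()])
--
--     return next_gw_fdr, next_five_fdr, remaining_fdr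
-- ===== SOURCE B (Python) =====
-- def _calculate_player_fdr(team, remaining_gws, next_gw_number):
--     games_remaining = len(remaining_gws)
--     next_gw_fdr = None
--     five_total = 0
--     remaining_total = 0
--     for i in range(games_remaining):
--         gw_dict = remaining_gws[next_gw_number + i]
--         if team in gw_dict:
--             s = sum(gw_dict[team])
--             remaining_total += s
--             if i < 5:
--                 five_total += s
--             if i == 0:
--                 next_gw_fdr = s
--     next_five_fdr = five_total if games_remaining > 4 else None
--     return next_gw_fdr, next_five_fdr, remaining_total
-- ===== Notes on version B (the rewrite author's own statement) =====
-- stated objective: alternative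
-- what changed: Replaced A's three separate scans (a head lookup, a five-gameweek list comprehension, and a full-range list comprehension) by one forward loop over the gameweeks that accumulates next-gw, five-window and remaining totals simultaneously.
import Mathlib
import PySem

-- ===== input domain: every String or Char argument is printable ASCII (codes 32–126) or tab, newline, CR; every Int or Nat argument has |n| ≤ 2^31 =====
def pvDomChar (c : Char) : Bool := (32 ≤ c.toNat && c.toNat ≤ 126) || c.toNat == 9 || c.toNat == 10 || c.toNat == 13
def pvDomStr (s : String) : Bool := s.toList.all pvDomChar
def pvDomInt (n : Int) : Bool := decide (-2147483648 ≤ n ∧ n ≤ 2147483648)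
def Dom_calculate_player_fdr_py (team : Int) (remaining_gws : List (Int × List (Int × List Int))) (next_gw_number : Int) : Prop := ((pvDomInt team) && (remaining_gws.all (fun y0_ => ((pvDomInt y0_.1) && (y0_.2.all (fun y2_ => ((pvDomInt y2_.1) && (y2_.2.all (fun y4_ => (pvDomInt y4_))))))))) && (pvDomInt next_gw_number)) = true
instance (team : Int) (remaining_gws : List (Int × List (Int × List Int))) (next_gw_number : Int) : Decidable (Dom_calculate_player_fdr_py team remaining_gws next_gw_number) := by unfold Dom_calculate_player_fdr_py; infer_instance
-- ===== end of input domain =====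

-- B replaces A's three separate scans (head lookup + five-window comprehension + full comprehension)
-- by ONE forward loop accumulating all three results; objective: alternative single-pass decomposition.

-- ===== PORT A =====
-- contribution of gameweek gw: the inner dict is looked up with getD [] — exact wherever the Python
-- does not raise KeyError (Pre_ guarantees every gw of the range is a key of remaining_gws)
def pvContrib (team : Int) (d : PySem.Dict Int (List (Int × List Int))) (gw : Int) : Option Int :=
  let g := PySem.Dict.mk (d.getD gw [])
  if g.contains team then some (g.getD team []).sum else none

def calculate_player_fdr_py (team : Int) (remaining_gws : List (Int × List (Int × List Int))) (next_gw_number : Int) : Option Int × Option Int × Option Int :=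
  let d := PySem.Dict.mk remaining_gws
  let games_remaining : Int := remaining_gws.length
  let next_gw_fdr : Option Int :=
    if games_remaining ≥ 1 then
      match d.get? next_gw_number with
      | some next_gw =>
          let g := PySem.Dict.mk next_gw
          if g.contains team then some (g.getD team []).sum else none
      | none => none   -- Python raises KeyError here; excluded by Pre_
    else none
  let next_five_fdr : Option Int :=
    if games_remaining > 4 then
      some ((PySem.List.pyRange next_gw_number (next_gw_number + 5) 1).filterMap (pvContrib team d)).sum
    else none
  let remaining_fdr : Int :=
    ((PySem.List.pyRange next_gw_number (next_gw_number + games_remaining) 1).filterMap (pvContrib team d)).sum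
  (next_gw_fdr, next_five_fdr, some remaining_fdr)

-- ===== PORT B =====
-- single forward pass: for i in range(len), accumulate (next_gw_fdr, five_total, remaining_total)
def pvStep (team : Int) (d : PySem.Dict Int (List (Int × List Int))) (next_gw_number : Int)
    (st : Option Int × Int × Int) (i : Nat) : Option Int × Int × Int :=
  let g := PySem.Dict.mk (d.getD (next_gw_number + (i : Int)) [])   -- KeyError excluded by Pre_
  if g.contains team then
    let s := (g.getD team []).sum
    ((if i = 0 then some s else st.1),
     st.2.1 + (if i < 5 then s else 0),
     st.2.2 + s)
  else st

def calculate_player_fdr_py_alt (team : Int) (remaining_gws : List (Int × List (Int × List Int))) (next_gw_number : Int) : Option Int × Option Int × Option Int :=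
  let d := PySem.Dict.mk remaining_gws
  let n := remaining_gws.length
  let st := (List.range n).foldl (pvStep team d next_gw_number) (none, 0, 0)
  (st.1, (if (n : Int) > 4 then some st.2.1 else none), some st.2.2)

-- ===== PRECONDITION & SPEC =====
-- Pre_ excludes only inputs on which the Python A raises KeyError: some gameweek number in
-- [next_gw_number, next_gw_number + len) is missing from remaining_gws.
def Pre_calculate_player_fdr_py (team : Int) (remaining_gws : List (Int × List (Int × List Int))) (next_gw_number : Int) : Prop :=
  ((PySem.List.pyRange next_gw_number (next_gw_number + remaining_gws.length) 1).all
    (fun gw => (PySem.Dict.mk remaining_gws).contains gw)) = true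
instance (team : Int) (remaining_gws : List (Int × List (Int × List Int))) (next_gw_number : Int) : Decidable (Pre_calculate_player_fdr_py team remaining_gws next_gw_number) := by unfold Pre_calculate_player_fdr_py; infer_instance
def pvWitness_calculate_player_fdr_py : Int × (List (Int × List (Int × List Int))) × Int :=
  (1, [(10, [(1, [2, 3])])], 10)
def Spec_calculate_player_fdr_py (team : Int) (remaining_gws : List (Int × List (Int × List Int))) (next_gw_number : Int) (out : Option Int × Option Int × Option Int) : Prop := out = calculate_player_fdr_py_alt team remaining_gws next_gw_number
instance (team : Int) (remaining_gws : List (Int × List (Int × List Int))) (next_gw_number : Int) (out : Option Int × Option Int × Option Int) : Decidable (Spec_calculate_player_fdr_py team remaining_gws next_gw_number out) := by unfold Spec_calculate_player_fdr_py; infer_instance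

-- ===== CLAIM (what is proved, stated in full; the proofs are below) =====
def Claim_equal_calculate_player_fdr_py : Prop := ∀ (team : Int) (remaining_gws : List (Int × List (Int × List Int))) (next_gw_number : Int), Dom_calculate_player_fdr_py team remaining_gws next_gw_number → Pre_calculate_player_fdr_py team remaining_gws next_gw_number → Spec_calculate_player_fdr_py team remaining_gws next_gw_number (calculate_player_fdr_py team remaining_gws next_gw_number)

-- ===== LEMMAS AND PROOFS =====

-- contribution as a total Int function (0 when the team is absent)
def pvF (team : Int) (d : PySem.Dict Int (List (Int × List Int))) (gw : Int) : Int :=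
  let g := PySem.Dict.mk (d.getD gw [])
  if g.contains team then (g.getD team []).sum else 0

lemma contrib_eq_some (team : Int) (d : PySem.Dict Int (List (Int × List Int))) (gw : Int)
    (hc : (PySem.Dict.mk (d.getD gw [])).contains team = true) :
    pvContrib team d gw = some ((PySem.Dict.mk (d.getD gw [])).getD team []).sum := by
  simp [pvContrib, hc]

lemma contrib_eq_none (team : Int) (d : PySem.Dict Int (List (Int × List Int))) (gw : Int)
    (hc : ¬ (PySem.Dict.mk (d.getD gw [])).contains team = true) :
    pvContrib team d gw = none := by
  simp [pvContrib, hc]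

lemma pvF_eq (team : Int) (d : PySem.Dict Int (List (Int × List Int))) (gw : Int) :
    pvF team d gw = if (PySem.Dict.mk (d.getD gw [])).contains team
      then ((PySem.Dict.mk (d.getD gw [])).getD team []).sum else 0 := rfl

lemma sum_filterMap_contrib (team : Int) (d : PySem.Dict Int (List (Int × List Int))) (l : List Int) :
    (l.filterMap (pvContrib team d)).sum = (l.map (pvF team d)).sum := by
  induction l with
  | nil => rfl
  | cons x xs ih =>
      by_cases hc : (PySem.Dict.mk (d.getD x [])).contains team = true
      · simp only [List.filterMap_cons, contrib_eq_some _ _ _ hc, List.map_cons, pvF_eq,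
          if_pos hc, List.sum_cons, ih]
      · simp only [List.filterMap_cons, contrib_eq_none _ _ _ hc, List.map_cons, pvF_eq,
          if_neg hc, List.sum_cons, ih, zero_add]

-- loop invariant: the fold over range n computes the three A-side quantities
lemma foldl_step_eq (team : Int) (d : PySem.Dict Int (List (Int × List Int))) (a : Int) (n : Nat) :
    (List.range n).foldl (pvStep team d a) (none, 0, 0) =
      ((if n = 0 then none else pvContrib team d a),
       ((PySem.List.pyRange a (a + min (n : Int) 5) 1).map (pvF team d)).sum,
       ((PySem.List.pyRange a (a + (n : Int)) 1).map (pvF team d)).sum) := by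
  induction n with
  | zero => simp [PySem.List.pyRange_one_eq_nil]
  | succ n ih =>
      rw [List.range_succ, List.foldl_append, List.foldl_cons, List.foldl_nil, ih]
      have hr : ∀ m : Int, 0 ≤ m →
          PySem.List.pyRange a (a + (m + 1)) 1 = PySem.List.pyRange a (a + m) 1 ++ [a + m] := by
        intro m hm
        have := PySem.List.pyRange_one_succ_right (a := a) (b := a + m) (by omega)
        rw [← this, add_assoc]
      unfold pvStep
      by_cases hc : (PySem.Dict.mk (d.getD (a + (n : Int)) [])).contains team = true
      · rw [if_pos hc]
        refine Prod.ext ?_ (Prod.ext ?_ ?_)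
        · rcases Nat.eq_zero_or_pos n with h0 | h0
          · subst h0
            simp only [Nat.cast_zero, add_zero] at hc ⊢
            rw [contrib_eq_some team d a hc]
            simp
          · simp [Nat.pos_iff_ne_zero.mp h0]
        · by_cases h5 : n < 5
          · have hmin1 : min (((n : Nat) + 1 : Nat) : Int) 5 = (n : Int) + 1 := by push_cast; omega
            have hmin2 : min ((n : Nat) : Int) 5 = (n : Int) := by omega
            rw [hmin1, hmin2, hr (n : Int) (by positivity), List.map_append, List.sum_append]
            simp [h5, pvF_eq, hc]
          · have hmin1 : min (((n : Nat) + 1 : Nat) : Int) 5 = 5 := by push_cast; omega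
            have hmin2 : min ((n : Nat) : Int) 5 = 5 := by omega
            rw [hmin1, hmin2]
            simp [h5]
        · have : (((n : Nat) + 1 : Nat) : Int) = (n : Int) + 1 := by push_cast; ring
          rw [this, hr (n : Int) (by positivity), List.map_append, List.sum_append]
          simp [pvF_eq, hc]
      · rw [if_neg hc]
        refine Prod.ext ?_ (Prod.ext ?_ ?_)
        · rcases Nat.eq_zero_or_pos n with h0 | h0
          · subst h0
            simp only [Nat.cast_zero, add_zero] at hc ⊢
            rw [contrib_eq_none team d a hc]
            simp
          · simp [Nat.pos_iff_ne_zero.mp h0]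
        · by_cases h5 : n < 5
          · have hmin1 : min (((n : Nat) + 1 : Nat) : Int) 5 = (n : Int) + 1 := by push_cast; omega
            have hmin2 : min ((n : Nat) : Int) 5 = (n : Int) := by omega
            rw [hmin1, hmin2, hr (n : Int) (by positivity), List.map_append, List.sum_append]
            simp [pvF_eq, hc]
          · have hmin1 : min (((n : Nat) + 1 : Nat) : Int) 5 = 5 := by push_cast; omega
            have hmin2 : min ((n : Nat) : Int) 5 = 5 := by omega
            rw [hmin1, hmin2]
        · have : (((n : Nat) + 1 : Nat) : Int) = (n : Int) + 1 := by push_cast; ring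
          rw [this, hr (n : Int) (by positivity), List.map_append, List.sum_append]
          simp [pvF_eq, hc]

-- ===== VERDICT (by name: the statement is the Claim_ definition above) =====
theorem calculate_player_fdr_py_spec : Claim_equal_calculate_player_fdr_py := by
  intro team rg a _hdom hpre
  unfold Spec_calculate_player_fdr_py calculate_player_fdr_py calculate_player_fdr_py_alt
  dsimp only
  rw [foldl_step_eq]
  by_cases hn : rg.length = 0
  · simp [hn, PySem.List.pyRange_one_eq_nil, sum_filterMap_contrib]
  · have hge : ((rg.length : Int) ≥ 1) = True := by simp; omega
    have hmem : a ∈ PySem.List.pyRange a (a + (rg.length : Int)) 1 := by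
      rw [PySem.List.mem_pyRange_one]
      constructor
      · omega
      · omega
    have hcont : (PySem.Dict.mk rg).contains a = true := by
      unfold Pre_calculate_player_fdr_py at hpre
      rw [List.all_eq_true] at hpre
      exact hpre a hmem
    have hfirst : (match (PySem.Dict.mk rg).get? a with
        | some next_gw =>
            let g := PySem.Dict.mk next_gw
            if g.contains team then some (g.getD team []).sum else none
        | none => none) = pvContrib team (PySem.Dict.mk rg) a := by
      rcases hsome : (PySem.Dict.mk rg).get? a with _ | l
      · rw [PySem.Dict.contains_eq_isSome_get?] at hcont
        simp [hsome] at hcont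
      · have hgd : (PySem.Dict.mk rg).getD a [] = l := PySem.Dict.getD_of_get?_eq_some _ _ hsome
        simp only [pvContrib, hsome, hgd]
    simp only [hge, if_true, hfirst, if_neg hn]
    have h5 : min ((rg.length : Nat) : Int) 5 = if ((rg.length : Nat) : Int) > 4 then 5 else ((rg.length : Nat) : Int) := by
      split <;> omega
    by_cases h4 : ((rg.length : Nat) : Int) > 4
    · simp only [h5, if_pos h4]
      simp [sum_filterMap_contrib]
    · simp only [h5, if_neg h4]
      simp [sum_filterMap_contrib]
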